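-- pv_equiv track=rewrite | github.com/crakshay1/RNA-PS | rna_tools/generate_rna.py | find_hairpin_loops
-- ===== SOURCE A (Python) =====
-- def find_hairpin_loops(dot_bracket: str):
--     """
--     Return a list of hairpin loops as (start, end) indices.
--     Hairpin = run of '.' that is immediately preceded by '(' and followed by ')'.
--     """
--     loops = []
--     i = 0
--     n = len(dot_bracket)
--     while i < n:
--         if dot_bracket[i] == '.':
--             j = i
--             while j < n and dot_bracket[j] == '.':
--                 j += 1
--             # i..j-1 is a run of '.'
--             if i > 0 and j < n and dot_bracket[i-1] == '(' and dot_bracket[j] == ')':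
--                 loops.append((i, j-1))
--             i = j
--         else:
--             i += 1
--     return loops
-- ===== SOURCE B (Python) =====
-- from itertools import groupby
--
-- def find_hairpin_loops(dot_bracket: str):
--     """
--     Return a list of hairpin loops as (start, end) indices.
--     Hairpin = run of '.' that is immediately preceded by '(' and followed by ')'.
--     Strategy: run-length encode the string into maximal runs, then scan the
--     runs with one-run lookahead: a '.' run whose previous run is of '(' and
--     next run is of ')' is a hairpin loop.
--     """
--     runs = [(ch, sum(1 for _ in grp)) for ch, grp in groupby(dot_bracket)]
--     loops = []
--     pos = 0
--     prev = None
--     for idx, (ch, k) in enumerate(runs):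
--         nxt = runs[idx + 1][0] if idx + 1 < len(runs) else None
--         if ch == '.' and prev == '(' and nxt == ')':
--             loops.append((pos, pos + k - 1))
--         prev = ch
--         pos += k
--     return loops
-- ===== Notes on version B (the rewrite author's own statement) =====
-- stated objective: alternative
-- what changed: B first run-length encodes the string into maximal runs (itertools.groupby) and then scans the run list with one-run lookahead, instead of A's character-level two-pointer state machine with an inner dot-run loop and manual flank index checks.
import Mathlib
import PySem

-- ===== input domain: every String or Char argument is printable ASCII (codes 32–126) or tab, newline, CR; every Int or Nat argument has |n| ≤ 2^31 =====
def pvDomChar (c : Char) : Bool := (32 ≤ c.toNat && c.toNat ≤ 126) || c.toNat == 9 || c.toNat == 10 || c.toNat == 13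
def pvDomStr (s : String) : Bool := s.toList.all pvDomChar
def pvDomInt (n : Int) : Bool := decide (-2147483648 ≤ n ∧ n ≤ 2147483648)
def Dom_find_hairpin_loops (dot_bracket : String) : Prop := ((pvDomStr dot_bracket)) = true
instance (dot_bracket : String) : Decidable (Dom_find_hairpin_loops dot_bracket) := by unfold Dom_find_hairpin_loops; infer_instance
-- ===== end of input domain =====

-- B run-length encodes the string into maximal runs and scans the run list with
-- one-run lookahead, replacing A's character-level two-pointer state machine;
-- objective: alternative decomposition.  Return values proved equal on all inputs.

-- ===== PORT A =====
-- inner `while j < n and dot_bracket[j] == '.'` loop of A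
def pvRunA (s : List Char) (j : Nat) : Nat :=
  if h : j < s.length ∧ s.getD j ' ' = '.' then pvRunA s (j + 1) else j
termination_by s.length - j
decreasing_by omega

theorem pvRunA_ge (s : List Char) (j : Nat) : j ≤ pvRunA s j := by
  fun_induction pvRunA s j with
  | case1 j h ih => omega
  | case2 j h => omega

-- outer while loop of A; acc = loops; indexing via getD (all accesses are guarded in range)
def pvLoopA (s : List Char) (i : Nat) (acc : List (Int × Int)) : List (Int × Int) :=
  if hi : i < s.length then
    if s.getD i ' ' = '.' then
      let j := pvRunA s i
      let acc' := if 0 < i ∧ j < s.length ∧ s.getD (i - 1) ' ' = '(' ∧ s.getD j ' ' = ')'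
        then acc ++ [((i : Int), (j : Int) - 1)] else acc
      pvLoopA s j acc'
    else
      pvLoopA s (i + 1) acc
  else acc
termination_by s.length - i
decreasing_by
  · have h1 : i + 1 ≤ pvRunA s (i + 1) := pvRunA_ge s (i + 1)
    have : pvRunA s i = pvRunA s (i + 1) := by
      rw [pvRunA]; simp_all
    omega
  · omega

def find_hairpin_loops (dot_bracket : String) : List (Int × Int) :=
  pvLoopA dot_bracket.toList 0 []

-- ===== PORT B =====
-- itertools.groupby: run-length encoding into maximal runs (char, length)
def pvRLE (l : List Char) : List (Char × Nat) :=
  match l with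
  | [] => []
  | c :: rest =>
    match pvRLE rest with
    | (d, k) :: t => if c = d then (c, k + 1) :: t else (c, 1) :: (d, k) :: t
    | [] => [(c, 1)]

-- B's for-loop over the runs, with prev char, running position, and one-run lookahead
def pvScanR (prev : Option Char) (pos : Nat) (runs : List (Char × Nat)) : List (Int × Int) :=
  match runs with
  | [] => []
  | (c, k) :: rest =>
    if c = '.' ∧ prev = some '(' ∧ rest.head?.map Prod.fst = some ')' then
      ((pos : Int), (pos : Int) + (k : Int) - 1) :: pvScanR (some c) (pos + k) rest
    else
      pvScanR (some c) (pos + k) rest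

def find_hairpin_loops_alt (dot_bracket : String) : List (Int × Int) :=
  pvScanR none 0 (pvRLE dot_bracket.toList)

-- ===== PRECONDITION & SPEC =====
def Spec_find_hairpin_loops (dot_bracket : String) (out : List (Int × Int)) : Prop := out = find_hairpin_loops_alt dot_bracket
instance (dot_bracket : String) (out : List (Int × Int)) : Decidable (Spec_find_hairpin_loops dot_bracket out) := by unfold Spec_find_hairpin_loops; infer_instance

-- ===== CLAIM (what is proved, stated in full; the proofs are below) =====
def Claim_equal_find_hairpin_loops : Prop := ∀ (dot_bracket : String), Dom_find_hairpin_loops dot_bracket → Spec_find_hairpin_loops dot_bracket (find_hairpin_loops dot_bracket)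

-- ===== LEMMAS AND PROOFS =====

theorem pvRunA_le (s : List Char) (a : Nat) : pvRunA s a ≤ max a s.length := by
  fun_induction pvRunA s a with
  | case1 j h ih => omega
  | case2 j h => omega

theorem pvRunA_succ (s : List Char) (a : Nat) (h : a < s.length ∧ s.getD a ' ' = '.') :
    pvRunA s a = pvRunA s (a + 1) := by
  conv_lhs => rw [pvRunA]
  rw [dif_pos h]

theorem pvRunA_stop (s : List Char) (a : Nat) (h : ¬ (a < s.length ∧ s.getD a ' ' = '.')) :
    pvRunA s a = a := by
  rw [pvRunA, dif_neg h]

theorem pvRunA_dots (s : List Char) (a : Nat) :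
    ∀ m, a ≤ m → m < pvRunA s a → s.getD m ' ' = '.' := by
  fun_induction pvRunA s a with
  | case1 j h ih =>
    intro m hm1 hm2
    rcases Nat.eq_or_lt_of_le hm1 with rfl | hlt
    · exact h.2
    · exact ih m hlt hm2
  | case2 j h => intro m hm1 hm2; omega

-- the first run of the RLE carries the first character of the list
theorem pvRLE_head_fst (l : List Char) :
    (pvRLE l).head?.map Prod.fst = l.head? := by
  induction l with
  | nil => simp [pvRLE]
  | cons c rest ih =>
    cases hr : pvRLE rest with
    | nil => simp [pvRLE, hr]
    | cons p t =>
      obtain ⟨d, k⟩ := p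
      by_cases h : c = d <;> simp [pvRLE, hr, h]

-- cons onto a list beginning with the same run extends that run
theorem pvRLE_cons_eq (c : Char) (rest : List Char) (k : Nat) (t : List (Char × Nat))
    (h : pvRLE rest = (c, k) :: t) : pvRLE (c :: rest) = (c, k + 1) :: t := by
  simp [pvRLE, h]

-- cons with a different (or absent) following character starts a fresh run
theorem pvRLE_cons_ne (c : Char) (rest : List Char) (h : rest.head? ≠ some c) :
    pvRLE (c :: rest) = (c, 1) :: pvRLE rest := by
  cases hr : pvRLE rest with
  | nil => simp [pvRLE, hr]
  | cons p t =>
    obtain ⟨d, k⟩ := p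
    have hd : (pvRLE rest).head?.map Prod.fst = rest.head? := pvRLE_head_fst rest
    rw [hr] at hd
    have : c ≠ d := by
      intro hc; subst hc; simp at hd; exact h hd.symm
    simp [pvRLE, hr, this]

-- splitting off a maximal dot run: the RLE of the suffix at a dot position
theorem pvRLE_dotrun (s : List Char) (i : Nat)
    (hi : i < s.length) (hd : s.getD i ' ' = '.') :
    pvRLE (s.drop i) = ('.', pvRunA s i - i) :: pvRLE (s.drop (pvRunA s i)) := by
  have hdrop : s.drop i = s[i] :: s.drop (i + 1) := List.drop_eq_getElem_cons hi
  have hgi : s[i] = '.' := by rwa [List.getD_eq_getElem s ' ' hi] at hd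
  have hstep : pvRunA s i = pvRunA s (i + 1) := pvRunA_succ s i ⟨hi, hd⟩
  by_cases h1 : i + 1 < s.length ∧ s.getD (i + 1) ' ' = '.'
  · have ih := pvRLE_dotrun s (i + 1) h1.1 h1.2
    have hge := pvRunA_ge s (i + 2)
    have hstep2 : pvRunA s (i + 1) = pvRunA s (i + 2) := pvRunA_succ s (i + 1) h1
    have hge1 : i + 1 ≤ pvRunA s (i + 1) := pvRunA_ge s (i + 1)
    rw [hdrop, hgi, pvRLE_cons_eq '.' _ _ _ ih, hstep]
    have hcnt : pvRunA s (i + 1) - (i + 1) + 1 = pvRunA s (i + 1) - i := by omega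
    rw [hcnt]
  · have hstop : pvRunA s (i + 1) = i + 1 := pvRunA_stop s (i + 1) h1
    have hne : (s.drop (i + 1)).head? ≠ some '.' := by
      rw [List.head?_drop]
      intro hc
      rcases Nat.lt_or_ge (i + 1) s.length with hl | hl
      · rw [List.getElem?_eq_getElem hl] at hc
        injection hc with hc
        exact h1 ⟨hl, by rw [List.getD_eq_getElem s ' ' hl, hc]⟩
      · rw [List.getElem?_eq_none (by omega)] at hc; cases hc
    rw [hdrop, hgi, pvRLE_cons_ne '.' _ hne, hstep, hstop]
    congr 2
    omega
termination_by s.length - i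
decreasing_by omega

-- main invariant: A's loop from position i equals B's run scan over the RLE of
-- the suffix, with prev = the character before i (none at i = 0)
theorem pv_main (s : List Char) (i : Nat) (acc : List (Int × Int)) :
    pvLoopA s i acc =
      acc ++ pvScanR (if i = 0 then none else some (s.getD (i - 1) ' ')) i (pvRLE (s.drop i)) := by
  by_cases hi : i < s.length
  · have hdrop : s.drop i = s[i] :: s.drop (i + 1) := List.drop_eq_getElem_cons hi
    have hgd : s.getD i ' ' = s[i] := List.getD_eq_getElem s ' ' hi
    by_cases hdot : s[i] = '.'
    · -- dot run: A jumps to j = end of the run; B consumes one RLE entry ('.', j - i)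
      have hcnd : s.getD i ' ' = '.' := by rw [hgd]; exact hdot
      set j := pvRunA s i with hj
      have hij : i < j := by
        have h1 := pvRunA_ge s (i + 1)
        have h2 := pvRunA_succ s i ⟨hi, hcnd⟩
        omega
      have hjle : j ≤ s.length := by
        have := pvRunA_le s i; omega
      have hrle := pvRLE_dotrun s i hi hcnd
      rw [← hj] at hrle
      -- the lookahead: first run of the tail carries s[j] (or none at the end)
      have hhead : (pvRLE (s.drop j)).head?.map Prod.fst = s[j]? := by
        rw [pvRLE_head_fst, List.head?_drop]
      have hcondB : (('.' : Char) = '.' ∧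
          (if i = 0 then none else some (s.getD (i - 1) ' ')) = some '(' ∧
          (pvRLE (s.drop j)).head?.map Prod.fst = some ')')
          ↔ (0 < i ∧ j < s.length ∧ s.getD (i - 1) ' ' = '(' ∧ s.getD j ' ' = ')') := by
        rw [hhead]
        constructor
        · rintro ⟨-, h2, h3⟩
          have hi0 : i ≠ 0 := by
            intro hz; rw [hz] at h2; simp at h2
          rw [if_neg hi0] at h2
          have hjn : j < s.length := by
            by_contra hge
            rw [List.getElem?_eq_none (by omega)] at h3; cases h3
          rw [List.getElem?_eq_getElem hjn] at h3
          injection h2 with h2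
          injection h3 with h3
          exact ⟨by omega, hjn, h2, by rw [List.getD_eq_getElem s ' ' hjn, h3]⟩
        · rintro ⟨h1, h2, h3, h4⟩
          refine ⟨rfl, by rw [if_neg (by omega), h3], ?_⟩
          rw [List.getElem?_eq_getElem h2]
          rw [List.getD_eq_getElem s ' ' h2] at h4
          rw [h4]
      have hprevj : (if j = 0 then none else some (s.getD (j - 1) ' ')) = some '.' := by
        have hjd : s.getD (j - 1) ' ' = '.' := pvRunA_dots s i (j - 1) (by omega) (by omega)
        rw [if_neg (by omega), hjd]
      have hpos : i + (j - i) = j := by omega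
      rw [pvLoopA]
      simp only [dif_pos hi, if_pos hcnd]
      rw [← hj, hrle, pvScanR]
      by_cases hA : 0 < i ∧ j < s.length ∧ s.getD (i - 1) ' ' = '(' ∧ s.getD j ' ' = ')'
      · rw [if_pos hA, if_pos (hcondB.mpr hA), pv_main s j (acc ++ [((i : Int), (j : Int) - 1)]),
          hprevj, hpos]
        have hpair : ((i : Int), (j : Int) - 1) = ((i : Int), (i : Int) + ((j - i : Nat) : Int) - 1) := by
          simp only [Prod.mk.injEq, true_and]; omega
        rw [hpair]
        simp [List.append_assoc]
      · rw [if_neg hA, if_neg (fun hc => hA (hcondB.mp hc)), pv_main s j acc, hprevj, hpos]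
    · -- non-dot character: A advances one position; B's first run shrinks or is consumed
      have hnd : ¬ s.getD i ' ' = '.' := by rw [hgd]; exact hdot
      rw [pvLoopA]
      simp only [dif_pos hi, if_neg hnd]
      rw [pv_main s (i + 1) acc]
      congr 1
      have hprev1 : (if i + 1 = 0 then none else some (s.getD (i + 1 - 1) ' ')) = some s[i] := by
        rw [if_neg (by omega)]
        simp only [Nat.add_sub_cancel]
        rw [hgd]
      rw [hprev1]
      by_cases hnext : (s.drop (i + 1)).head? = some s[i]
      · -- same char follows: first runs (c, k+1) vs (c, k) — both skip, positions align
        have hd1 : (pvRLE (s.drop (i + 1))).head?.map Prod.fst = some s[i] := by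
          rw [pvRLE_head_fst]; exact hnext
        cases hr : pvRLE (s.drop (i + 1)) with
        | nil => rw [hr] at hd1; cases hd1
        | cons p t =>
          obtain ⟨d, k⟩ := p
          rw [hr] at hd1
          simp at hd1
          subst hd1
          have hrle : pvRLE (s.drop i) = (s[i], k + 1) :: t := by
            rw [hdrop]; exact pvRLE_cons_eq _ _ _ _ hr
          rw [hrle, pvScanR, pvScanR]
          rw [if_neg (by rintro ⟨hc, -, -⟩; exact hdot hc),
              if_neg (by rintro ⟨hc, -, -⟩; exact hdot hc)]
          congr 1
          omega
      · -- fresh run of length 1 at i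
        have hrle : pvRLE (s.drop i) = (s[i], 1) :: pvRLE (s.drop (i + 1)) := by
          rw [hdrop]; exact pvRLE_cons_ne _ _ hnext
        rw [hrle, pvScanR]
        rw [if_neg (by rintro ⟨hc, -, -⟩; exact hdot hc)]
  · rw [pvLoopA, dif_neg hi, List.drop_eq_nil_of_le (by omega)]
    simp [pvRLE, pvScanR]
termination_by s.length - i
decreasing_by all_goals omega

-- ===== VERDICT (by name: the statement is the Claim_ definition above) =====
theorem find_hairpin_loops_spec : Claim_equal_find_hairpin_loops := by
  intro s _
  unfold Spec_find_hairpin_loops find_hairpin_loops find_hairpin_loops_alt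
  simpa using pv_main s.toList 0 []
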